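-- pv_equiv track=rewrite | github.com/Hrishikesh885/spcc_pract | leftFactor.py | remove_left_factoring
-- ===== SOURCE A (Python) =====
-- def remove_left_factoring(grammar):
--     new_grammar = {}
--
--     for nonterminal, productions in grammar.items():
--         common_prefixes = {}
--         new_productions = []
--
--         # Group productions by their common prefixes
--         for production in productions:
--             prefix = ""
--             for i, symbol in enumerate(production):
--                 prefix += symbol
--                 if i < len(production)-1 and all(p.startswith(prefix) for p in productions):
--                     continue
--                 else:
--                     # Found the longest common prefix
--                     common_prefixes.setdefault(prefix[:-1], []).append(production[i:])
--                     break
--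
--         for prefix, suffixes in common_prefixes.items():
--             if len(suffixes) > 1:
--                 # Create a new non-terminal for the common prefix
--                 new_nonterminal = nonterminal + "'"
--                 new_grammar[new_nonterminal] = suffixes
--                 new_productions.append(prefix + new_nonterminal)
--             else:
--                 new_productions.extend([prefix + suffix for suffix in suffixes])
--
--         new_grammar[nonterminal] = new_productions
--
--     return new_grammar
-- ===== SOURCE B (Python) =====
-- def _lcp(a, b):
--     # length of the longest common prefix of two strings
--     n = 0
--     m = min(len(a), len(b))
--     while n < m and a[n] == b[n]:
--         n += 1
--     return n
--
--
-- def remove_left_factoring(grammar):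
--     new_grammar = {}
--     for nonterminal, productions in grammar.items():
--         # longest common prefix length of ALL productions, computed once
--         if productions:
--             first = productions[0]
--             L = len(first)
--             for p in productions[1:]:
--                 L = min(L, _lcp(first, p))
--         else:
--             L = 0
--         # each production breaks at min(len-1, L); group by that prefix
--         groups = {}
--         for p in productions:
--             if not p:
--                 continue  # an empty right-hand side contributes nothing
--             k = min(len(p) - 1, L)
--             groups.setdefault(p[:k], []).append(p[k:])
--         new_productions = []
--         for prefix, suffixes in groups.items():
--             if len(suffixes) > 1:
--                 new_nonterminal = nonterminal + "'"
--                 new_grammar[new_nonterminal] = suffixes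
--                 new_productions.append(prefix + new_nonterminal)
--             else:
--                 new_productions.extend([prefix + suffix for suffix in suffixes])
--         new_grammar[nonterminal] = new_productions
--     return new_grammar
-- ===== Notes on version B (the rewrite author's own statement) =====
-- stated objective: alternative
-- what changed: Instead of rebuilding the prefix character by character and re-testing all productions with startswith at every character of every production (A), B computes the longest common prefix length L of the production list once per nonterminal and splits each production directly at min(len-1, L) before grouping.
import Mathlib
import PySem

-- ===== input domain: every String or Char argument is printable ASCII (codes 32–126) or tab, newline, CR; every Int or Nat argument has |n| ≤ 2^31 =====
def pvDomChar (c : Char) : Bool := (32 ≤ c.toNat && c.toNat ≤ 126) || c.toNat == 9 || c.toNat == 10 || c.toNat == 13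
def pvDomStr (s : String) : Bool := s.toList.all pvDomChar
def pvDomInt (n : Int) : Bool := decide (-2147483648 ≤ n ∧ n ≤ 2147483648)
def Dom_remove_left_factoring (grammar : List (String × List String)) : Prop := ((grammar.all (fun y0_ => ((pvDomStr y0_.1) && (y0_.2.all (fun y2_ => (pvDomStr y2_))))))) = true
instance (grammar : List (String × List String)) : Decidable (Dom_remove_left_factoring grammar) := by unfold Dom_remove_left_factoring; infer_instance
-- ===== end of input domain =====

-- B replaces A's per-character rescans of all productions with startswith by ONE longest-common-prefix
-- computation per nonterminal (each production then splits at min(len-1, lcp)): an alternative algorithm.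

-- ===== PORT A =====
-- inner `for i, symbol in enumerate(production): …` loop; `break` = stop recursing.
-- prefix[:-1] is dropLast (prefix is nonempty here), production[i:] is drop i (i ≥ 0): exact.
-- setdefault(k, []).append(x) is Dict.modify k [] (· ++ [x]).
def pvALoop (prods : List String) (pl : List Char) :
    List Char → Nat → List Char → PySem.Dict String (List String) → PySem.Dict String (List String)
  | [], _, _, cp => cp
  | c :: rest, i, pre, cp =>
    let pre' := pre ++ [c]
    if i < pl.length - 1 ∧ prods.all (fun p => PySem.Str.startswith p (String.ofList pre')) = true then
      pvALoop prods pl rest (i + 1) pre' cp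
    else
      cp.modify (String.ofList pre'.dropLast) [] (· ++ [String.ofList (pl.drop i)])

-- `for production in productions:` building common_prefixes
def pvAGroup (prods : List String) : PySem.Dict String (List String) :=
  prods.foldl (fun cp p => pvALoop prods p.toList p.toList 0 [] cp) PySem.Dict.empty

-- `for prefix, suffixes in common_prefixes.items(): …`
def pvAEmit (nt : String) (cp : PySem.Dict String (List String))
    (ng : PySem.Dict String (List String)) :
    PySem.Dict String (List String) × List String :=
  cp.items.foldl
    (fun st pv =>
      if pv.2.length > 1 then
        let nn := nt ++ "'"
        (st.1.insert nn pv.2, st.2 ++ [pv.1 ++ nn])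
      else
        (st.1, st.2 ++ pv.2.map (fun s => pv.1 ++ s)))
    (ng, [])

def remove_left_factoring (grammar : List (String × List String)) : List (String × List String) :=
  ((PySem.Dict.ofList grammar).items.foldl
    (fun ng p =>
      let st := pvAEmit p.1 (pvAGroup p.2) ng
      st.1.insert p.1 st.2)
    PySem.Dict.empty).items

-- ===== PORT B =====
-- port of Source B's `_lcp` while-loop as structural recursion over the two char lists
def pvLcp2 : List Char → List Char → Nat
  | a :: as, b :: bs => if a = b then pvLcp2 as bs + 1 else 0
  | _, _ => 0

-- `L = len(first); for p in productions[1:]: L = min(L, _lcp(first, p))`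
def pvLcpAll : List String → Nat
  | [] => 0
  | f :: rest => rest.foldl (fun L p => min L (pvLcp2 f.toList p.toList)) f.toList.length

-- `for p in productions: if not p: continue; k = min(len(p)-1, L); groups.setdefault(p[:k], []).append(p[k:])`
def pvBGroup (prods : List String) : PySem.Dict String (List String) :=
  let L := pvLcpAll prods
  prods.foldl
    (fun g p =>
      if p.toList = [] then g
      else
        let k := min (p.toList.length - 1) L
        g.modify (String.ofList (p.toList.take k)) [] (· ++ [String.ofList (p.toList.drop k)]))
    PySem.Dict.empty

-- `for prefix, suffixes in groups.items(): …` (same emission loop as A)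
def pvBEmit (nt : String) (cp : PySem.Dict String (List String))
    (ng : PySem.Dict String (List String)) :
    PySem.Dict String (List String) × List String :=
  cp.items.foldl
    (fun st pv =>
      if pv.2.length > 1 then
        let nn := nt ++ "'"
        (st.1.insert nn pv.2, st.2 ++ [pv.1 ++ nn])
      else
        (st.1, st.2 ++ pv.2.map (fun s => pv.1 ++ s)))
    (ng, [])

def remove_left_factoring_alt (grammar : List (String × List String)) : List (String × List String) :=
  ((PySem.Dict.ofList grammar).items.foldl
    (fun ng p =>
      let st := pvBEmit p.1 (pvBGroup p.2) ng
      st.1.insert p.1 st.2)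
    PySem.Dict.empty).items

-- ===== PRECONDITION & SPEC =====
def Spec_remove_left_factoring (grammar : List (String × List String)) (out : List (String × List String)) : Prop := out = remove_left_factoring_alt grammar
instance (grammar : List (String × List String)) (out : List (String × List String)) : Decidable (Spec_remove_left_factoring grammar out) := by unfold Spec_remove_left_factoring; infer_instance

-- ===== CLAIM (what is proved, stated in full; the proofs are below) =====
def Claim_equal_remove_left_factoring : Prop := ∀ (grammar : List (String × List String)), Dom_remove_left_factoring grammar → Spec_remove_left_factoring grammar (remove_left_factoring grammar)

-- ===== LEMMAS AND PROOFS =====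

theorem pvLcp2_le_iff (m : Nat) : ∀ (a b : List Char), m ≤ a.length →
    (m ≤ pvLcp2 a b ↔ a.take m <+: b) := by
  induction m with
  | zero => intro a b _; simp
  | succ j ih =>
    intro a b hm
    match a, b with
    | [], _ => simp at hm
    | x :: as, [] =>
      simp [pvLcp2]
    | x :: as, y :: bs =>
      simp only [List.length_cons, Nat.succ_le_succ_iff] at hm
      by_cases hxy : x = y
      · subst hxy
        simp [pvLcp2, List.cons_prefix_cons, ih as bs hm]
      · simp [pvLcp2, hxy, List.cons_prefix_cons]

theorem pvFoldlMin_le_iff (m : Nat) (g : String → Nat) :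
    ∀ (l : List String) (init : Nat),
      (m ≤ l.foldl (fun L p => min L (g p)) init ↔ m ≤ init ∧ ∀ p ∈ l, m ≤ g p) := by
  intro l
  induction l with
  | nil => simp
  | cons q qs ih =>
    intro init
    simp only [List.foldl_cons, ih, le_min_iff, List.mem_cons]
    constructor
    · rintro ⟨⟨h1, h2⟩, h3⟩
      exact ⟨h1, fun p hp => hp.elim (fun e => e ▸ h2) (h3 p)⟩
    · rintro ⟨h1, h2⟩
      exact ⟨⟨h1, h2 q (Or.inl rfl)⟩, fun p hp => h2 p (Or.inr hp)⟩

-- the all-startswith test A runs per character, characterised by B's single lcp value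
theorem pvAll_startswith_iff (prods : List String) (p : String) (hp : p ∈ prods)
    (m : Nat) (hm : m ≤ p.toList.length) :
    (prods.all (fun q => PySem.Str.startswith q (String.ofList (p.toList.take m))) = true
      ↔ m ≤ pvLcpAll prods) := by
  match prods with
  | [] => simp at hp
  | f :: rest =>
    have hall : (∀ q ∈ f :: rest, p.toList.take m <+: q.toList) ↔ m ≤ pvLcpAll (f :: rest) := by
      rw [pvLcpAll, pvFoldlMin_le_iff]
      constructor
      · intro h
        have hf : p.toList.take m <+: f.toList := h f (List.mem_cons_self ..)
        have hlen : (p.toList.take m).length = m := by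
          rw [List.length_take, Nat.min_eq_left hm]
        have hmf : m ≤ f.toList.length := hlen ▸ hf.length_le
        have heq : p.toList.take m = f.toList.take m := by
          rw [List.prefix_iff_eq_take.mp hf, hlen]
        refine ⟨hmf, fun q hq => ?_⟩
        rw [pvLcp2_le_iff m f.toList q.toList hmf, ← heq]
        exact h q (List.mem_cons_of_mem _ hq)
      · rintro ⟨hmf, h⟩
        have hftake : ∀ q ∈ rest, f.toList.take m <+: q.toList := by
          intro q hq
          exact (pvLcp2_le_iff m f.toList q.toList hmf).mp (h q hq)
        have heq : p.toList.take m = f.toList.take m := by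
          rcases List.mem_cons.mp hp with rfl | hpr
          · rfl
          · have hpre : f.toList.take m <+: p.toList := hftake p hpr
            have hlen : (f.toList.take m).length = m := by
              rw [List.length_take, Nat.min_eq_left hmf]
            rw [List.prefix_iff_eq_take.mp hpre, hlen]
        intro q hq
        rw [heq]
        rcases List.mem_cons.mp hq with rfl | hqr
        · exact List.take_prefix _ _
        · exact hftake q hqr
    rw [← hall]
    simp only [List.all_eq_true]
    constructor
    · intro h q hq
      have := h q hq
      rw [PySem.Str.startswith_eq] at this
      have e : (String.ofList (List.take m p.toList)).toList = List.take m p.toList := String.toList_ofList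
      have := (PySem.Chars.startswith_iff _ _).mp this
      rw [e] at this; exact this
    · intro h q hq
      rw [PySem.Str.startswith_eq]
      apply (PySem.Chars.startswith_iff _ _).mpr
      have e : (String.ofList (List.take m p.toList)).toList = List.take m p.toList := String.toList_ofList
      rw [e]; exact h q hq

-- A's inner character loop lands exactly at k = min(len-1, lcp)
theorem pvALoop_split (prods : List String) (p : String) (hp : p ∈ prods) :
    ∀ (rest pre : List Char) (i : Nat) (cp : PySem.Dict String (List String)),
      p.toList = pre ++ rest → rest ≠ [] → pre.length = i →
      i ≤ min (p.toList.length - 1) (pvLcpAll prods) →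
      pvALoop prods p.toList rest i pre cp =
        cp.modify (String.ofList (p.toList.take (min (p.toList.length - 1) (pvLcpAll prods)))) []
          (· ++ [String.ofList (p.toList.drop (min (p.toList.length - 1) (pvLcpAll prods)))]) := by
  set k := min (p.toList.length - 1) (pvLcpAll prods) with hk
  intro rest
  induction rest with
  | nil => intro pre i cp _ hne; exact absurd rfl hne
  | cons c rest' ih =>
    intro pre i cp hsplit _ hlen hik
    have hsplit' : p.toList = (pre ++ [c]) ++ rest' := by rw [hsplit]; simp
    have hlenpl : p.toList.length = i + 1 + rest'.length := by
      rw [hsplit']; simp [hlen]; omega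
    have hpre1 : pre ++ [c] = p.toList.take (i + 1) := by
      rw [hsplit', List.take_left' (by simp [hlen])]
    have hprei : p.toList.take i = pre := by
      rw [hsplit, List.take_left' hlen]
    have hcond : (i < p.toList.length - 1 ∧
        prods.all (fun q => PySem.Str.startswith q (String.ofList (pre ++ [c]))) = true)
        ↔ i + 1 ≤ k := by
      rw [hpre1, pvAll_startswith_iff prods p hp (i + 1) (by omega)]
      rw [hk]; omega
    rw [pvALoop]
    by_cases hC : i + 1 ≤ k
    · rw [if_pos (hcond.mpr hC)]
      have hrest' : rest' ≠ [] := by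
        intro h
        rw [h] at hlenpl
        simp only [List.length_nil] at hlenpl
        rw [hk] at hC
        omega
      exact ih (pre ++ [c]) (i + 1) cp hsplit' hrest' (by simp [hlen]) hC
    · rw [if_neg (fun h => hC (hcond.mp h))]
      have hik' : i = k := by omega
      have hdl : (pre ++ [c]).dropLast = p.toList.take k := by
        rw [List.dropLast_concat, ← hik', hprei]
      rw [hdl, hik']

-- the two grouping folds agree step by step
theorem pvGroup_eq (prods : List String) : pvAGroup prods = pvBGroup prods := by
  unfold pvAGroup pvBGroup
  apply PySem.List.foldl_congr_mem
  intro cp p hp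
  by_cases hnil : p.toList = []
  · rw [hnil]; simp [pvALoop]
  · simp only [if_neg hnil]
    exact pvALoop_split prods p hp p.toList [] 0 cp (by simp) hnil rfl (Nat.zero_le _)

-- ===== VERDICT (by name: the statement is the Claim_ definition above) =====
theorem remove_left_factoring_spec : Claim_equal_remove_left_factoring := by
  intro grammar _
  unfold Spec_remove_left_factoring
  unfold remove_left_factoring remove_left_factoring_alt
  have hemit : ∀ nt cp ng, pvAEmit nt cp ng = pvBEmit nt cp ng := fun _ _ _ => rfl
  simp only [pvGroup_eq, hemit]
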